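-- pv_equiv track=rewrite | github.com/linhdvu14/cp-sols | sols/CodeForces/1678_d2/B2_Tokitsukaze_and_Good_01_String_hard_version_.py | solve
-- ===== SOURCE A (Python) =====
-- def solve(N, A):
--     res1 = res2 = 0
--     prev = ''
--     for i in range(0, N, 2):
--         if A[i] != A[i+1]:
--             res1 += 1
--         else:
--             if A[i] != prev: res2 += 1
--             prev = A[i]
--     return res1, max(res2, 1)
-- ===== SOURCE B (Python) =====
-- def solve(N, A):
--     idxs = range(0, N, 2)
--     res1 = sum(1 for i in idxs if A[i] != A[i+1])
--     chars = [A[i] for i in idxs if A[i] == A[i+1]]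
--     if chars:
--         res2 = 1 + sum(1 for x, y in zip(chars, chars[1:]) if x != y)
--     else:
--         res2 = 0
--     return res1, max(res2, 1)
-- ===== Notes on version B (the rewrite author's own statement) =====
-- stated objective: idiomatic
-- what changed: The fused single loop with three accumulators (res1, res2, prev) is split into two declarative passes: a comprehension-sum counting unequal pairs, and a materialized list of equal-pair characters whose run count is taken by comparing adjacent elements via zip, replacing the manual prev-state tracking.
import Mathlib
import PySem

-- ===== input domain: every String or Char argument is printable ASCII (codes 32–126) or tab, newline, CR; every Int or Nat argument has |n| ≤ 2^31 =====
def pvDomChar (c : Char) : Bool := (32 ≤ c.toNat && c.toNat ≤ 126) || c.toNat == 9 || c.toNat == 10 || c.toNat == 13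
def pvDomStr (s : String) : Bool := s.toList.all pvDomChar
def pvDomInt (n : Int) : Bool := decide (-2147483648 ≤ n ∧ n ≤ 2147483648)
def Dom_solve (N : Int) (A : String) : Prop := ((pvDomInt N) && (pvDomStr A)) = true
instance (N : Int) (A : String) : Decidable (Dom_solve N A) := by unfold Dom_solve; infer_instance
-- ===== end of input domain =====

-- B replaces A's fused three-accumulator loop by two declarative passes (a pair-mismatch
-- count and a run count over a materialized list of equal-pair characters); objective: idiomatic.


-- ===== PORT A =====
-- one loop iteration of A: the branch order and updates match the Python line for line;
-- the catch-all match arm is where Python would raise IndexError (excluded by Pre_solve)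
def stepA (A : String) (st : Int × Int × Option Char) (i : Int) : Int × Int × Option Char :=
  match PySem.Str.pyGet? A i, PySem.Str.pyGet? A (i + 1) with
  | some a, some b =>
      if a ≠ b then (st.1 + 1, st.2.1, st.2.2)
      else if some a ≠ st.2.2 then (st.1, st.2.1 + 1, some a)
      else (st.1, st.2.1, some a)
  | _, _ => st

def solve (N : Int) (A : String) : Int × Int :=
  let r := (PySem.List.pyRange 0 N 2).foldl (stepA A) (0, 0, none)
  (r.1, max r.2.1 1)

-- ===== PORT B =====
-- 'A[i] if A[i] == A[i+1]' of the comprehension building chars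
def pairChar? (A : String) (i : Int) : Option Char :=
  match PySem.Str.pyGet? A i, PySem.Str.pyGet? A (i + 1) with
  | some a, some b => if a = b then some a else none
  | _, _ => none

def solve_alt (N : Int) (A : String) : Int × Int :=
  let idxs := PySem.List.pyRange 0 N 2
  let res1 : Int :=
    (idxs.countP (fun i => PySem.Str.pyGet? A i != PySem.Str.pyGet? A (i + 1)) : Nat)
  let chars : List Char := idxs.filterMap (pairChar? A)
  let res2 : Int :=
    match chars with
    | [] => 0
    | _ :: rest => 1 + ((chars.zip rest).countP (fun p => p.1 != p.2) : Nat)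
  (res1, max res2 1)

-- ===== PRECONDITION & SPEC =====
-- exactly the inputs on which Python A returns (every A[i], A[i+1] access in range);
-- elsewhere A raises IndexError
def Pre_solve (N : Int) (A : String) : Prop :=
  N ≤ PySem.Str.len A ∧ (N % 2 = 0 ∨ N < PySem.Str.len A)
instance (N : Int) (A : String) : Decidable (Pre_solve N A) := by
  unfold Pre_solve; infer_instance
def pvWitness_solve : Int × String := (4, "0110")

def Spec_solve (N : Int) (A : String) (out : Int × Int) : Prop := out = solve_alt N A
instance (N : Int) (A : String) (out : Int × Int) : Decidable (Spec_solve N A out) := by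
  unfold Spec_solve; infer_instance

-- ===== CLAIM (what is proved, stated in full; the proofs are below) =====
def Claim_equal_solve : Prop :=
  ∀ (N : Int) (A : String), Dom_solve N A → Pre_solve N A → Spec_solve N A (solve N A)

-- ===== LEMMAS AND PROOFS =====

-- number of runs of consecutive equal characters, started with previous value p
def runs : Option Char → List Char → Int
  | _, [] => 0
  | p, c :: cs => (if some c ≠ p then (1 : Int) else 0) + runs (some c) cs

-- the prev value after consuming cs
def lastO (p : Option Char) : List Char → Option Char
  | [] => p
  | c :: cs => lastO (some c) cs

theorem fold_main (A : String) :
    ∀ (L : List Int) (r1 r2 : Int) (prev : Option Char),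
      (∀ i ∈ L, 0 ≤ i ∧ i + 1 < (A.toList.length : Int)) →
      L.foldl (stepA A) (r1, r2, prev) =
        (r1 + (L.countP (fun i => PySem.Str.pyGet? A i != PySem.Str.pyGet? A (i + 1)) : Nat),
         r2 + runs prev (L.filterMap (pairChar? A)),
         lastO prev (L.filterMap (pairChar? A))) := by
  intro L
  induction L with
  | nil => intro r1 r2 prev _; simp [runs, lastO]
  | cons i L ih =>
      intro r1 r2 prev h
      obtain ⟨h0, h1⟩ := h i (List.mem_cons_self ..)
      have hA : PySem.List.pyGet? A.toList i = some (A.toList[i.toNat]'(by omega)) :=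
        PySem.List.pyGet?_eq_some_getElem A.toList h0 (by omega)
      have hB : PySem.List.pyGet? A.toList (i + 1) = some (A.toList[(i + 1).toNat]'(by omega)) :=
        PySem.List.pyGet?_eq_some_getElem A.toList (i := i + 1) (by omega) h1
      have htail := fun r1 r2 prev => ih r1 r2 prev (fun j hj => h j (List.mem_cons_of_mem _ hj))
      rw [List.foldl_cons, List.countP_cons, List.filterMap_cons]
      by_cases hab : A.toList[i.toNat]'(by omega) = A.toList[(i + 1).toNat]'(by omega)
      · -- equal pair: contributes to chars
        have hstep : stepA A (r1, r2, prev) i =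
            if some (A.toList[i.toNat]'(by omega)) ≠ prev
            then (r1, r2 + 1, some (A.toList[i.toNat]'(by omega)))
            else (r1, r2, some (A.toList[i.toNat]'(by omega))) := by
          simp [stepA, hA, hB, hab]
        have hpc : pairChar? A i = some (A.toList[i.toNat]'(by omega)) := by
          simp [pairChar?, hA, hB, hab]
        have hcnt : (PySem.Str.pyGet? A i != PySem.Str.pyGet? A (i + 1)) = false := by
          simp [hA, hB, hab]
        rw [hpc, hcnt]
        by_cases hp : some (A.toList[i.toNat]'(by omega)) = prev
        · rw [hstep, if_neg (by simpa using hp)]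
          rw [htail]
          simp [runs, lastO, hp]
        · rw [hstep, if_pos (by simpa using hp)]
          rw [htail]
          simp only [runs, lastO, if_pos (show some _ ≠ prev from hp)]
          refine Prod.ext rfl (Prod.ext ?_ rfl)
          push_cast
          ring
      · -- unequal pair: contributes to res1
        have hstep : stepA A (r1, r2, prev) i = (r1 + 1, r2, prev) := by
          simp [stepA, hA, hB, hab]
        have hpc : pairChar? A i = none := by
          simp [pairChar?, hA, hB, hab]
        have hcnt : (PySem.Str.pyGet? A i != PySem.Str.pyGet? A (i + 1)) = true := by
          simp [hA, hB, hab]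
        rw [hpc, hcnt, hstep, htail]
        refine Prod.ext ?_ rfl
        simp only [if_true]
        push_cast
        ring

theorem runs_some_eq_zip (t : List Char) :
    ∀ c, runs (some c) t = ((((c :: t).zip t).countP (fun p => p.1 != p.2) : Nat) : Int) := by
  induction t with
  | nil => intro c; simp [runs]
  | cons d t ih =>
      intro c
      simp only [runs, List.zip_cons_cons, List.countP_cons, ih d]
      by_cases h : d = c
      · simp [h]
      · have hcd : c ≠ d := fun e => h e.symm
        simp [h, hcd]
        ring

theorem pre_indices (N : Int) (A : String) (hPre : Pre_solve N A) :
    ∀ i ∈ PySem.List.pyRange 0 N 2, 0 ≤ i ∧ i + 1 < (A.toList.length : Int) := by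
  intro i hi
  rw [PySem.List.mem_pyRange_iff_of_pos (by norm_num)] at hi
  obtain ⟨hPre1, hPre2⟩ := hPre
  simp only [PySem.Str.len_eq] at hPre1 hPre2
  omega

-- ===== VERDICT (by name: the statement is the Claim_ definition above) =====
theorem solve_spec : Claim_equal_solve := by
  intro N A _ hPre
  unfold Spec_solve solve solve_alt
  rw [fold_main A _ 0 0 none (pre_indices N A hPre)]
  cases hc : (PySem.List.pyRange 0 N 2).filterMap (pairChar? A) with
  | nil => simp [hc, runs]
  | cons c rest => simp [hc, runs, runs_some_eq_zip rest c]
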